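-- pv_equiv track=rewrite | github.com/notPlancha/AML-homework | src/lab3/lab_3_compare_cbow_skipgram.py | generate_skipgram_data
-- ===== SOURCE A (Python) =====
-- def generate_skipgram_data(corpus, context_window):
--   data = []
--   for i in range(context_window, len(corpus) - context_window):
--     target = corpus[i]
--     context = corpus[i - context_window : i] + corpus[i + 1 : i + context_window + 1]
--     for ctx in context:
--       data.append((target, ctx))
--   return data
-- ===== SOURCE B (Python) =====
-- def generate_skipgram_data(corpus, context_window):
--     w = context_window
--     n = len(corpus)
--     if n < 2 * w + 1:
--         return []
--     targets = corpus[w:n - w]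
--     offsets = [j for j in range(-w, w + 1) if j != 0]
--     columns = [list(zip(targets, corpus[w + j:n - w + j])) for j in offsets]
--     return [col[i] for i in range(len(targets)) for col in columns]
-- ===== Notes on version B (the rewrite author's own statement) =====
-- stated objective: alternative
-- what changed: B is built in staged passes: it first materialises one full column per offset by zipping the target slice against a shifted slice of the corpus (no per-center loop or indexing), then gathers the result row by row from those precomputed columns.
import Mathlib
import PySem

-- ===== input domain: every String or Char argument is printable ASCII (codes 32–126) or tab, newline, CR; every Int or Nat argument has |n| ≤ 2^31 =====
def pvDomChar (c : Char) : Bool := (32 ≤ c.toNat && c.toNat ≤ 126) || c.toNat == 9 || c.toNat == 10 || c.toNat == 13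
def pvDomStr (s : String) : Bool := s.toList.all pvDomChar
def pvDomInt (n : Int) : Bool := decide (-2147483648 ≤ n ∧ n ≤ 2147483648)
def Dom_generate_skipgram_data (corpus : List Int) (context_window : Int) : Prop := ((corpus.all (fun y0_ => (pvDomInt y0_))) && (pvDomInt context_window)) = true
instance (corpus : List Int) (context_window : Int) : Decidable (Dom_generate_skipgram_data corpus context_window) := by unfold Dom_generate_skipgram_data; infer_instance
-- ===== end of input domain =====

-- B builds one full column per offset by zipping the target slice with a shifted slice of the
-- corpus, then gathers the output row by row from those precomputed columns (objective: alternative).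

-- ===== PORT A =====
def generate_skipgram_data (corpus : List Int) (context_window : Int) : List (Int × Int) :=
  (PySem.List.pyRange context_window ((corpus.length : Int) - context_window) 1).foldl
    (fun data i =>
      let target := PySem.List.pyGetD corpus i 0
      let context := PySem.List.slice corpus (some (i - context_window)) (some i) ++
                     PySem.List.slice corpus (some (i + 1)) (some (i + context_window + 1))
      context.foldl (fun d ctx => d ++ [(target, ctx)]) data) []

-- ===== PORT B =====
def generate_skipgram_data_alt (corpus : List Int) (context_window : Int) : List (Int × Int) :=
  let n : Int := corpus.length
  if n < 2 * context_window + 1 then [] else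
  let targets := PySem.List.slice corpus (some context_window) (some (n - context_window))
  let offsets := (PySem.List.pyRange (-context_window) (context_window + 1) 1).filter (fun j => j != 0)
  let columns := offsets.map (fun j =>
    targets.zip (PySem.List.slice corpus (some (context_window + j)) (some (n - context_window + j))))
  (PySem.List.pyRange 0 (targets.length : Int) 1).flatMap
    (fun i => columns.map (fun col => PySem.List.pyGetD col i (0, 0)))

-- ===== PRECONDITION & SPEC =====
-- A raises IndexError whenever context_window < 0 (the range then runs past both ends of the list).
def Pre_generate_skipgram_data (corpus : List Int) (context_window : Int) : Prop := 0 ≤ context_window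
instance (corpus : List Int) (context_window : Int) : Decidable (Pre_generate_skipgram_data corpus context_window) := by unfold Pre_generate_skipgram_data; infer_instance
def pvWitness_generate_skipgram_data : List Int × Int := ([1, 2, 3, 4, 5], 2)

def Spec_generate_skipgram_data (corpus : List Int) (context_window : Int) (out : List (Int × Int)) : Prop := out = generate_skipgram_data_alt corpus context_window
instance (corpus : List Int) (context_window : Int) (out : List (Int × Int)) : Decidable (Spec_generate_skipgram_data corpus context_window out) := by unfold Spec_generate_skipgram_data; infer_instance

-- ===== CLAIM (what is proved, stated in full; the proofs are below) =====
def Claim_equal_generate_skipgram_data : Prop := ∀ (corpus : List Int) (context_window : Int), Dom_generate_skipgram_data corpus context_window → Pre_generate_skipgram_data corpus context_window → Spec_generate_skipgram_data corpus context_window (generate_skipgram_data corpus context_window)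

-- ===== LEMMAS AND PROOFS =====

-- the common shape both programs are reduced to: for each centre index i, for each offset j, (corpus[i], corpus[i+j])
def skipCanon (corpus : List Int) (cw : Int) : List (Int × Int) :=
  (PySem.List.pyRange cw ((corpus.length : Int) - cw) 1).flatMap (fun i =>
    (PySem.List.pyRange (-cw) 0 1 ++ PySem.List.pyRange 1 (cw + 1) 1).map
      (fun j => (PySem.List.pyGetD corpus i 0, PySem.List.pyGetD corpus (i + j) 0)))

-- a slice with in-range nonnegative bounds is the map of pyGetD over the index range
lemma slice_eq_map_pyRange (xs : List Int) (a b : Int) (ha : 0 ≤ a) (hab : a ≤ b)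
    (hb : b ≤ (xs.length : Int)) :
    PySem.List.slice xs (some a) (some b) =
      (PySem.List.pyRange a b 1).map (fun k => PySem.List.pyGetD xs k 0) := by
  rw [PySem.List.slice_toNat xs ha (le_trans ha hab),
      ← PySem.List.map_pyGetD_pyRange xs 0 ha,
      PySem.List.pyRange_one_append a b (PySem.List.len xs) hab (by simpa [PySem.List.len_eq] using hb),
      List.map_append]
  rw [List.take_append_of_le_length (by simp [PySem.List.length_pyRange_one]; omega)]
  rw [List.take_of_length_le (by simp [PySem.List.length_pyRange_one]; omega)]

-- shifting a unit-step index range under the pair-building map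
lemma map_shift_pyRange (corpus : List Int) (t a b i : Int) :
    (PySem.List.pyRange a b 1).map (fun j => (t, PySem.List.pyGetD corpus (i + j) 0)) =
      (PySem.List.pyRange (i + a) (i + b) 1).map (fun k => (t, PySem.List.pyGetD corpus k 0)) := by
  rw [PySem.List.pyRange_one, PySem.List.pyRange_one]
  simp only [List.map_map]
  have hd : (i + b - (i + a)) = b - a := by ring
  rw [hd]
  apply List.map_congr_left
  intro k _
  simp only [Function.comp]
  congr 2
  ring

-- A equals the canonical shape
lemma A_eq_canon (corpus : List Int) (cw : Int) (hpre : 0 ≤ cw) :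
    generate_skipgram_data corpus cw = skipCanon corpus cw := by
  unfold generate_skipgram_data skipCanon
  simp only [PySem.List.foldl_append_singleton_eq_map, PySem.List.foldl_append_eq_flatMap,
    List.nil_append]
  apply List.flatMap_congr (fun i hi => ?_)
  rw [PySem.List.mem_pyRange_one] at hi
  rw [slice_eq_map_pyRange corpus (i - cw) i (by omega) (by omega) (by omega),
      slice_eq_map_pyRange corpus (i + 1) (i + cw + 1) (by omega) (by omega) (by omega),
      List.map_append, List.map_map, List.map_map,
      List.map_append,
      map_shift_pyRange corpus (PySem.List.pyGetD corpus i 0) (-cw) 0 i,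
      map_shift_pyRange corpus (PySem.List.pyGetD corpus i 0) 1 (cw + 1) i]
  have h1 : i + -cw = i - cw := by ring
  have h3 : i + (cw + 1) = i + cw + 1 := by ring
  rw [h1, h3, add_zero]
  rfl

-- the filtered symmetric range is the two one-sided ranges
lemma filter_offsets (cw : Int) (hpre : 0 ≤ cw) :
    (PySem.List.pyRange (-cw) (cw + 1) 1).filter (fun j => j != 0) =
      PySem.List.pyRange (-cw) 0 1 ++ PySem.List.pyRange 1 (cw + 1) 1 := by
  rw [PySem.List.pyRange_one_append (-cw) 0 (cw + 1) (by omega) (by omega), List.filter_append]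
  rw [PySem.List.pyRange_one_cons (by omega : (0:Int) < cw + 1)]
  rw [List.filter_eq_self.mpr (fun x hx => by
        rw [PySem.List.mem_pyRange_one] at hx; simpa using (by omega : x ≠ 0))]
  simp only [List.filter_cons]
  rw [if_neg (by simp)]
  rw [List.filter_eq_self.mpr (fun x hx => by
        rw [PySem.List.mem_pyRange_one] at hx; simpa using (by omega : x ≠ 0))]
  norm_num

-- the target slice has length (n - 2*cw).toNat
lemma len_targets (corpus : List Int) (cw : Int) (hpre : 0 ≤ cw) :
    ((PySem.List.slice corpus (some cw) (some ((corpus.length : Int) - cw))).length : Int) =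
      max 0 ((corpus.length : Int) - cw - cw) := by
  rw [PySem.List.length_slice]
  simp only [PySem.List.clampIdx]
  split_ifs <;> push_cast <;> omega

-- B equals the canonical shape
lemma B_eq_canon (corpus : List Int) (cw : Int) (hpre : 0 ≤ cw) :
    generate_skipgram_data_alt corpus cw = skipCanon corpus cw := by
  simp only [generate_skipgram_data_alt, skipCanon]
  by_cases hsmall : (corpus.length : Int) < 2 * cw + 1
  · rw [if_pos hsmall,
        PySem.List.pyRange_one_eq_nil (a := cw) (b := (corpus.length : Int) - cw) (by omega)]
    rfl
  rw [if_neg hsmall]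
  rw [filter_offsets cw hpre]
  have hlen : (((PySem.List.slice corpus (some cw) (some ((corpus.length : Int) - cw))).length : Int))
      = max 0 ((corpus.length : Int) - cw - cw) := len_targets corpus cw hpre
  set tl := (PySem.List.slice corpus (some cw) (some ((corpus.length : Int) - cw))).length with htl
  rw [PySem.List.pyRange_one 0 (tl : Int), PySem.List.pyRange_one cw ((corpus.length : Int) - cw)]
  rw [show ((tl : Int) - 0).toNat = tl by omega,
      show ((corpus.length : Int) - cw - cw).toNat = tl by omega]
  rw [List.flatMap_map, List.flatMap_map]
  apply List.flatMap_congr (fun k hk => ?_)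
  have hk' : k < tl := List.mem_range.mp hk
  have hbig : (k : Int) < (corpus.length : Int) - cw - cw := by omega
  simp only [List.map_map, zero_add]
  apply List.map_congr_left
  intro j hj
  have hjb : -cw ≤ j ∧ j ≤ cw := by
    rcases List.mem_append.mp hj with h | h <;> rw [PySem.List.mem_pyRange_one] at h <;> omega
  simp only [Function.comp_apply]
  rw [PySem.List.pyGetD_natCast]
  rw [slice_eq_map_pyRange corpus cw ((corpus.length : Int) - cw) hpre (by omega) (by omega),
      slice_eq_map_pyRange corpus (cw + j) ((corpus.length : Int) - cw + j) (by omega) (by omega)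
        (by omega)]
  have hzl : k < (((PySem.List.pyRange cw ((corpus.length : Int) - cw) 1).map
        (fun t => PySem.List.pyGetD corpus t 0)).zip
      ((PySem.List.pyRange (cw + j) ((corpus.length : Int) - cw + j) 1).map
        (fun t => PySem.List.pyGetD corpus t 0))).length := by
    simp only [List.length_zip, List.length_map, PySem.List.length_pyRange_one]
    omega
  rw [List.getD_eq_getElem _ _ hzl, List.getElem_zip, List.getElem_map, List.getElem_map,
      PySem.List.getElem_pyRange_one, PySem.List.getElem_pyRange_one]
  rw [show cw + j + (k : Int) = cw + (k : Int) + j by ring]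

-- ===== VERDICT (by name: the statement is the Claim_ definition above) =====
theorem generate_skipgram_data_spec : Claim_equal_generate_skipgram_data := by
  intro corpus cw _ hpre
  unfold Spec_generate_skipgram_data
  rw [A_eq_canon corpus cw hpre, B_eq_canon corpus cw hpre]
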